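-- pv_equiv track=rewrite | github.com/tcjacker/whether_commit | backend/app/services/agentic_change_assessment/builder.py | _hunk_deletes_guard_or_fallback
-- ===== SOURCE A (Python) =====
-- from typing import Any, Dict, List
--
-- def _hunk_deletes_guard_or_fallback(hunk: Dict[str, Any]) -> bool:
--     guard_tokens = (
--         "catch",
--         "except",
--         "fallback",
--         "default",
--         "permission",
--         "authorize",
--         "validate",
--         "validation",
--         "guard",
--         "if ",
--     )
--     for line in hunk.get("lines", []):
--         if line.get("type") != "remove":
--             continue
--         content = str(line.get("content") or "").lower()
--         if any(token in content for token in guard_tokens):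
--             return True
--     return False
-- ===== SOURCE B (Python) =====
-- def _hunk_deletes_guard_or_fallback(hunk):
--     guard_tokens = (
--         "catch",
--         "except",
--         "fallback",
--         "default",
--         "permission",
--         "authorize",
--         "validate",
--         "validation",
--         "guard",
--         "if ",
--     )
--     aggregate = "\n".join(
--         str(line.get("content") or "").lower()
--         for line in hunk.get("lines", [])
--         if line.get("type") == "remove"
--     )
--     return any(token in aggregate for token in guard_tokens)
-- ===== Notes on version B (the rewrite author's own statement) =====
-- stated objective: simpler
-- what changed: B gathers the lowercased content of all removed lines into one newline-joined aggregate string and does a single any() over the tokens against it, instead of A's per-line loop with an interleaved per-token scan and early return; the newline separator (absent from every token) makes the two equivalent.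
import Mathlib
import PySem

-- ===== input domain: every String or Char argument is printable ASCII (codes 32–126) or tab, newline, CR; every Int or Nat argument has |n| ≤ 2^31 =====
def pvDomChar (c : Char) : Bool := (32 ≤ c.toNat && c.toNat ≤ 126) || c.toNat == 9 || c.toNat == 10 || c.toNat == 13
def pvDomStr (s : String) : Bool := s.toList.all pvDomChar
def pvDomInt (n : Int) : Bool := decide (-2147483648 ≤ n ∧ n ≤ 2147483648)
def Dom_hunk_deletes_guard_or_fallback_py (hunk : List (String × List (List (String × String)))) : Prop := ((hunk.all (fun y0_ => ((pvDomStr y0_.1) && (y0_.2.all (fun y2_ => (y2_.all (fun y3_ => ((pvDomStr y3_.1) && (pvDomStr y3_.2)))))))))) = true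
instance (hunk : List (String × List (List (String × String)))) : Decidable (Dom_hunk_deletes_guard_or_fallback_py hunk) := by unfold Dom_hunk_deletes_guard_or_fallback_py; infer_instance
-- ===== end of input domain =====

-- B replaces A's interleaved per-line/per-token scan by a gather-then-scan decomposition: join the
-- lowered removed-line contents with "\n" and run one any() over the tokens (objective: simpler).


-- ===== PORT A =====
def pvGuardTokens : List String :=
  ["catch", "except", "fallback", "default", "permission", "authorize",
   "validate", "validation", "guard", "if "]

-- the for-loop over the lines, with its early `return True`
def pvLinesA : List (List (String × String)) → Bool
  | [] => false
  | line :: rest =>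
    if (PySem.Dict.mk line).get? "type" ≠ some "remove" then pvLinesA rest
    else
      let content := PySem.Str.lower ((PySem.Dict.mk line).getD "content" "")
      if pvGuardTokens.any (fun token => PySem.Str.isIn token content) then true
      else pvLinesA rest

def hunk_deletes_guard_or_fallback_py (hunk : List (String × List (List (String × String)))) : Bool :=
  pvLinesA ((PySem.Dict.mk hunk).getD "lines" [])

-- ===== PORT B =====
-- B gathers the lowered removed-line contents into one "\n"-joined aggregate, then scans the tokens once.
def hunk_deletes_guard_or_fallback_py_alt (hunk : List (String × List (List (String × String)))) : Bool :=
  let aggregate := PySem.Str.join "\n"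
    ((((PySem.Dict.mk hunk).getD "lines" []).filter
        (fun line => (PySem.Dict.mk line).get? "type" == some "remove")).map
      (fun line => PySem.Str.lower ((PySem.Dict.mk line).getD "content" "")))
  pvGuardTokens.any (fun token => PySem.Str.isIn token aggregate)

-- ===== PRECONDITION & SPEC =====
def Spec_hunk_deletes_guard_or_fallback_py (hunk : List (String × List (List (String × String)))) (out : Bool) : Prop := out = hunk_deletes_guard_or_fallback_py_alt hunk
instance (hunk : List (String × List (List (String × String)))) (out : Bool) : Decidable (Spec_hunk_deletes_guard_or_fallback_py hunk out) := by unfold Spec_hunk_deletes_guard_or_fallback_py; infer_instance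

-- ===== CLAIM (what is proved, stated in full; the proofs are below) =====
def Claim_equal_hunk_deletes_guard_or_fallback_py : Prop := ∀ (hunk : List (String × List (List (String × String)))), Dom_hunk_deletes_guard_or_fallback_py hunk → Spec_hunk_deletes_guard_or_fallback_py hunk (hunk_deletes_guard_or_fallback_py hunk)

-- ===== LEMMAS AND PROOFS =====

-- a prefix of `p ++ c :: rest` that does not contain c is a prefix of p
theorem pv_prefix_append_cons {c : Char} {sub : List Char} :
    ∀ {p rest : List Char}, c ∉ sub → sub <+: p ++ c :: rest → sub <+: p := by
  intro p
  induction p generalizing sub with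
  | nil =>
    intro rest hc h
    cases sub with
    | nil => exact List.nil_prefix
    | cons s sub' =>
      rw [List.nil_append, List.cons_prefix_cons] at h
      exact absurd (h.1 ▸ List.mem_cons_self) hc
  | cons a p' ih =>
    intro rest hc h
    cases sub with
    | nil => exact List.nil_prefix
    | cons s sub' =>
      rw [List.cons_append, List.cons_prefix_cons] at h
      rw [List.cons_prefix_cons]
      exact ⟨h.1, ih (fun hm => hc (List.mem_cons_of_mem _ hm)) h.2⟩

-- an infix of `p ++ c :: rest` that does not contain c lies in p or in rest
theorem pv_infix_append_cons {c : Char} {sub : List Char} (hc : c ∉ sub) :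
    ∀ {p rest : List Char}, (sub <:+: p ++ c :: rest ↔ sub <:+: p ∨ sub <:+: rest) := by
  intro p
  induction p with
  | nil =>
    intro rest
    constructor
    · intro h
      rw [List.nil_append, List.infix_cons_iff] at h
      rcases h with h | h
      · have : sub <+: ([] : List Char) := pv_prefix_append_cons hc h
        exact Or.inl (List.IsPrefix.isInfix this)
      · exact Or.inr h
    · rintro (h | h)
      · exact h.trans ⟨[], c :: rest, by simp⟩
      · exact h.trans ⟨[c], [], by simp⟩
  | cons a p' ih =>
    intro rest
    constructor
    · intro h
      rw [List.cons_append, List.infix_cons_iff] at h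
      rcases h with h | h
      · exact Or.inl (List.IsPrefix.isInfix (pv_prefix_append_cons hc h))
      · rcases (ih (rest := rest)).mp h with h' | h'
        · exact Or.inl (h'.trans (List.suffix_cons a p').isInfix)
        · exact Or.inr h'
    · rintro (h | h)
      · exact h.trans ⟨[], c :: rest, by simp⟩
      · exact h.trans ⟨a :: p' ++ [c], [], by simp⟩

-- a nonempty newline-free token occurs in the "\n"-join iff it occurs in one of the parts
theorem pv_infix_join {sub : List Char} (hne : sub ≠ []) (hc : '\n' ∉ sub) :
    ∀ (parts : List (List Char)),
      (sub <:+: PySem.Chars.join ['\n'] parts ↔ ∃ p ∈ parts, sub <:+: p) := by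
  intro parts
  induction parts with
  | nil =>
    rw [PySem.Chars.join_nil]
    simp only [List.not_mem_nil, false_and, exists_false, iff_false]
    intro h
    exact hne (List.eq_nil_of_infix_nil h)
  | cons p rest ih =>
    cases rest with
    | nil =>
      rw [PySem.Chars.join_singleton]
      simp
    | cons q r =>
      rw [PySem.Chars.join_cons_cons, List.append_assoc, List.singleton_append,
        pv_infix_append_cons hc, ih]
      constructor
      · rintro (h | ⟨x, hx, h⟩)
        · exact ⟨p, List.mem_cons_self, h⟩
        · exact ⟨x, List.mem_cons_of_mem _ hx, h⟩
      · rintro ⟨x, hx, h⟩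
        rcases List.mem_cons.mp hx with rfl | hx
        · exact Or.inl h
        · exact Or.inr ⟨x, hx, h⟩

-- the same statement for the Str-level primitives B uses
theorem pv_isIn_join (sub : String) (hne : sub.toList ≠ []) (hc : '\n' ∉ sub.toList)
    (parts : List String) :
    PySem.Str.isIn sub (PySem.Str.join "\n" parts) = parts.any (fun p => PySem.Str.isIn sub p) := by
  rcases h : parts.any (fun p => PySem.Str.isIn sub p) with _ | _
  · rw [Bool.eq_false_iff]
    intro hIn
    rw [PySem.Str.isIn_iff_infix, PySem.Str.toList_join] at hIn
    have : ('\n'.toString).toList = ['\n'] := rfl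
    rw [show ("\n" : String).toList = ['\n'] from rfl] at hIn
    rcases (pv_infix_join hne hc _).mp hIn with ⟨p, hp, hinf⟩
    rcases List.mem_map.mp hp with ⟨s, hs, rfl⟩
    have : PySem.Str.isIn sub s = true := (PySem.Str.isIn_iff_infix _ _).mpr hinf
    have := List.any_eq_true.mpr ⟨s, hs, this⟩
    rw [h] at this; exact Bool.false_ne_true this
  · rcases List.any_eq_true.mp h with ⟨s, hs, hIn⟩
    rw [PySem.Str.isIn_iff_infix] at hIn
    rw [PySem.Str.isIn_iff_infix, PySem.Str.toList_join,
      show ("\n" : String).toList = ['\n'] from rfl]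
    exact (pv_infix_join hne hc _).mpr ⟨s.toList, List.mem_map_of_mem hs, hIn⟩

-- A's loop is the Bool `any` of its per-line test
theorem pv_linesA_eq_any (lines : List (List (String × String))) :
    pvLinesA lines = lines.any (fun line =>
      ((PySem.Dict.mk line).get? "type" == some "remove") &&
      pvGuardTokens.any (fun token =>
        PySem.Str.isIn token (PySem.Str.lower ((PySem.Dict.mk line).getD "content" "")))) := by
  induction lines with
  | nil => rfl
  | cons line rest ih =>
    rw [List.any_cons, pvLinesA]
    by_cases hty : (PySem.Dict.mk line).get? "type" = some "remove"
    · simp only [hty, ne_eq, not_true_eq_false, if_false, beq_self_eq_true, Bool.true_and]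
      split <;> simp_all
    · simp only [hty, ne_eq, not_false_eq_true, if_true, ih]
      simp [hty]

-- every guard token is nonempty and newline-free
theorem pv_tokens_ok : ∀ t ∈ pvGuardTokens, t.toList ≠ [] ∧ '\n' ∉ t.toList := by decide

theorem pv_any_congr_mem {l : List String} {p q : String → Bool}
    (h : ∀ a ∈ l, p a = q a) : l.any p = l.any q := by
  induction l with
  | nil => rfl
  | cons x t ih =>
    rw [List.any_cons, List.any_cons, h x List.mem_cons_self,
      ih (fun a ha => h a (List.mem_cons_of_mem _ ha))]

theorem pv_main (hunk : List (String × List (List (String × String)))) :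
    hunk_deletes_guard_or_fallback_py hunk = hunk_deletes_guard_or_fallback_py_alt hunk := by
  unfold hunk_deletes_guard_or_fallback_py hunk_deletes_guard_or_fallback_py_alt
  rw [pv_linesA_eq_any]
  rw [pv_any_congr_mem (l := pvGuardTokens)
    (q := fun token => ((((PySem.Dict.mk hunk).getD "lines" []).filter
        (fun line => (PySem.Dict.mk line).get? "type" == some "remove")).map
      (fun line => PySem.Str.lower ((PySem.Dict.mk line).getD "content" ""))).any
        (fun p => PySem.Str.isIn token p))
    (fun t ht => pv_isIn_join t (pv_tokens_ok t ht).1 (pv_tokens_ok t ht).2 _)]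
  simp only [List.any_map, List.any_filter, Function.comp]
  rcases ha : (((PySem.Dict.mk hunk).getD "lines" []).any (fun line =>
      ((PySem.Dict.mk line).get? "type" == some "remove") &&
      pvGuardTokens.any (fun token =>
        PySem.Str.isIn token (PySem.Str.lower ((PySem.Dict.mk line).getD "content" ""))))) with _ | _
  · symm
    rw [Bool.eq_false_iff] at ha ⊢
    intro h
    apply ha
    rcases List.any_eq_true.mp h with ⟨t, ht, h2⟩
    rcases List.any_eq_true.mp h2 with ⟨l, hl, h3⟩
    simp only [Bool.and_eq_true] at h3
    exact List.any_eq_true.mpr ⟨l, hl, by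
      simp only [Bool.and_eq_true]
      exact ⟨h3.1, List.any_eq_true.mpr ⟨t, ht, h3.2⟩⟩⟩
  · symm
    rcases List.any_eq_true.mp ha with ⟨l, hl, h2⟩
    simp only [Bool.and_eq_true] at h2
    rcases List.any_eq_true.mp h2.2 with ⟨t, ht, h3⟩
    exact List.any_eq_true.mpr ⟨t, ht, List.any_eq_true.mpr ⟨l, hl, by
      simp only [Bool.and_eq_true]; exact ⟨h2.1, h3⟩⟩⟩

-- ===== VERDICT (by name: the statement is the Claim_ definition above) =====
theorem hunk_deletes_guard_or_fallback_py_spec : Claim_equal_hunk_deletes_guard_or_fallback_py := by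
  intro hunk _
  unfold Spec_hunk_deletes_guard_or_fallback_py
  exact pv_main hunk
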